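-- pv_equiv track=rewrite | github.com/PaulZwie/playagain_pipeline | playagain_pipeline/data/scripts/data_viewer.py | parse_channel_spec
-- ===== SOURCE A (Python) =====
-- def parse_channel_spec(spec: str, max_channels: int) -> list[int]:
--     spec = spec.strip()
--     if not spec or spec.lower() in {"all", "*"}:
--         return list(range(max_channels))
--
--     channels: set[int] = set()
--     chunks = [c.strip() for c in spec.split(",") if c.strip()]
--     for chunk in chunks:
--         if "-" in chunk:
--             start_str, end_str = chunk.split("-", maxsplit=1)
--             start = max(1, int(start_str))
--             end = min(max_channels, int(end_str))
--             if start <= end: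
--                 channels.update(range(start - 1, end))
--         else:
--             idx = int(chunk)
--             if 1 <= idx <= max_channels:
--                 channels.add(idx - 1)
--
--     if not channels:
--         return list(range(min(8, max_channels)))
--     return sorted(channels)
-- ===== SOURCE B (Python) =====
-- def parse_channel_spec(spec: str, max_channels: int) -> list[int]:
--     spec = spec.strip()
--     if not spec or spec.lower() in {"all", "*"}:
--         return list(range(max_channels))
--
--     intervals: list[tuple[int, int]] = []
--     for piece in spec.split(","):
--         chunk = piece.strip()
--         if not chunk:
--             continue
--         if "-" in chunk:
--             start_str, end_str = chunk.split("-", maxsplit=1)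
--             lo = max(1, int(start_str)) - 1
--             hi = min(max_channels, int(end_str))
--             if lo < hi:
--                 intervals.append((lo, hi))
--         else:
--             idx = int(chunk)
--             if 1 <= idx <= max_channels:
--                 intervals.append((idx - 1, idx))
--
--     if not intervals:
--         return list(range(min(8, max_channels)))
--
--     intervals.sort()
--     out: list[int] = []
--     cur_lo, cur_hi = intervals[0]
--     for lo, hi in intervals[1:]:
--         if lo <= cur_hi:
--             if hi > cur_hi:
--                 cur_hi = hi
--         else:
--             out.extend(range(cur_lo, cur_hi))
--             cur_lo, cur_hi = lo, hi
--     out.extend(range(cur_lo, cur_hi))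
--     return out
-- ===== Notes on version B (the rewrite author's own statement) =====
-- stated objective: alternative
-- what changed: B replaces A's set accumulation plus final sorted() by collecting the chunks as half-open intervals, sorting the interval list lexicographically and merge-sweeping it, emitting the ordered index list directly; memory is proportional to the selection, not to a hash set of every selected index.
import Mathlib
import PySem

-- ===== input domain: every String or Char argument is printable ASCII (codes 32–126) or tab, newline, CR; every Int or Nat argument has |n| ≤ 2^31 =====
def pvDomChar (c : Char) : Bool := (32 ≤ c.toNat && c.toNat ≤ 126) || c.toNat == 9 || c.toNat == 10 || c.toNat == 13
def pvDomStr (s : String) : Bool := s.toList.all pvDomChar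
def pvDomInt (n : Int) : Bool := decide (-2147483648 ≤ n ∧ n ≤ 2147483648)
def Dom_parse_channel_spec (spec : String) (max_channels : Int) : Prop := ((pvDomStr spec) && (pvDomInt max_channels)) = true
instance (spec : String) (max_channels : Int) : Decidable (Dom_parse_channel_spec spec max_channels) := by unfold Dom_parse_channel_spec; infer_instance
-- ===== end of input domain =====

-- B replaces A's set-accumulate-then-sort by collecting half-open intervals, sorting them and
-- merge-sweeping the sorted intervals into the ordered index list (objective: alternative).
-- The equivalence is about the return value; neither program mutates its arguments.

-- ===== PORT A =====
-- chunks = [c.strip() for c in s.split(",") if c.strip()]  (shared shape helper, also used by Pre_)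
def pvChunks (s : List Char) : List (List Char) :=
  ((PySem.Chars.splitOn s [',']).map PySem.Chars.strip).filter (fun c => !c.isEmpty)

-- A's for-loop over the chunks, accumulating a set; none = int() raised ValueError.
-- '"-" in chunk' is ported as contains '-' (exact: the needle is a single character).
def pvA_loop (M : Int) : List (List Char) → PySem.Set Int → Option (PySem.Set Int)
  | [], acc => some acc
  | chunk :: rest, acc =>
    if chunk.contains '-' then
      match PySem.Chars.splitOnMax chunk ['-'] 1 with
      | [start_str, end_str] =>
        match PySem.Int.ofChars? start_str, PySem.Int.ofChars? end_str with
        | some sv, some ev =>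
          let start := max 1 sv
          let en := min M ev
          pvA_loop M rest (if start ≤ en then acc.update (PySem.List.pyRange (start - 1) en) else acc)
        | _, _ => none
      | _ => none  -- unreachable: split("-", 1) of a chunk containing '-' has two pieces
    else
      match PySem.Int.ofChars? chunk with
      | some idx => pvA_loop M rest (if 1 ≤ idx ∧ idx ≤ M then acc.add (idx - 1) else acc)
      | none => none

def parse_channel_spec (spec : String) (max_channels : Int) : List Int :=
  let s := PySem.Chars.strip spec.toList
  if s.isEmpty ∨ PySem.Chars.lower s = "all".toList ∨ PySem.Chars.lower s = "*".toList then
    PySem.List.pyRange 0 max_channels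
  else
    match pvA_loop max_channels (pvChunks s) PySem.Set.empty with
    | some channels =>
      if channels.isEmpty then PySem.List.pyRange 0 (min 8 max_channels)
      else PySem.List.sorted channels (fun x => x)
    | none => []  -- int() raised ValueError: excluded by Pre_

-- ===== PORT B =====
-- B's for-loop over the raw split pieces, collecting half-open intervals [lo, hi);
-- none = int() raised ValueError.
def pvB_loop (M : Int) : List (List Char) → List (Int × Int) → Option (List (Int × Int))
  | [], ivs => some ivs
  | piece :: rest, ivs =>
    let chunk := PySem.Chars.strip piece
    if chunk.isEmpty then pvB_loop M rest ivs
    else if chunk.contains '-' then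
      match PySem.Chars.splitOnMax chunk ['-'] 1 with
      | [start_str, end_str] =>
        match PySem.Int.ofChars? start_str, PySem.Int.ofChars? end_str with
        | some sv, some ev =>
          let lo := max 1 sv - 1
          let hi := min M ev
          pvB_loop M rest (if lo < hi then ivs ++ [(lo, hi)] else ivs)
        | _, _ => none
      | _ => none
    else
      match PySem.Int.ofChars? chunk with
      | some idx => pvB_loop M rest (if 1 ≤ idx ∧ idx ≤ M then ivs ++ [(idx - 1, idx)] else ivs)
      | none => none

-- the merge sweep over the (already sorted) remaining intervals, carrying the current
-- merged interval [cl, ch) and flushing it as a range when a gap appears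
def pvSweep : Int → Int → List (Int × Int) → List Int
  | cl, ch, [] => PySem.List.pyRange cl ch
  | cl, ch, (lo, hi) :: rest =>
    if lo ≤ ch then pvSweep cl (max ch hi) rest
    else PySem.List.pyRange cl ch ++ pvSweep lo hi rest

def parse_channel_spec_alt (spec : String) (max_channels : Int) : List Int :=
  let s := PySem.Chars.strip spec.toList
  if s.isEmpty ∨ PySem.Chars.lower s = "all".toList ∨ PySem.Chars.lower s = "*".toList then
    PySem.List.pyRange 0 max_channels
  else
    match pvB_loop max_channels (PySem.Chars.splitOn s [',']) [] with
    | some ivs =>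
      if ivs.isEmpty then PySem.List.pyRange 0 (min 8 max_channels)
      else
        -- intervals.sort() on pairs is Python's lexicographic tuple sort
        match PySem.List.sorted2 ivs (fun p => p.1) (fun p => p.2) with
        | [] => []  -- unreachable: ivs is nonempty
        | (l0, h0) :: rest => pvSweep l0 h0 rest
    | none => []

-- ===== PRECONDITION & SPEC =====
-- a chunk on which A's int() calls succeed (both halves of a '-' chunk, else the chunk itself)
def pvOkChunk (c : List Char) : Bool :=
  if c.contains '-' then
    match PySem.Chars.splitOnMax c ['-'] 1 with
    | [a, b] => (PySem.Int.ofChars? a).isSome && (PySem.Int.ofChars? b).isSome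
    | _ => false
  else (PySem.Int.ofChars? c).isSome

-- Pre_ excludes exactly the inputs where A raises ValueError: some comma chunk is not an
-- integer (or a '-' chunk whose halves are not integers), outside the early all/*/empty case.
def Pre_parse_channel_spec (spec : String) (max_channels : Int) : Prop :=
  let s := PySem.Chars.strip spec.toList
  s.isEmpty ∨ PySem.Chars.lower s = "all".toList ∨ PySem.Chars.lower s = "*".toList ∨
    ∀ c ∈ pvChunks s, pvOkChunk c = true
instance (spec : String) (max_channels : Int) : Decidable (Pre_parse_channel_spec spec max_channels) := by
  unfold Pre_parse_channel_spec; infer_instance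

def pvWitness_parse_channel_spec : String × Int := ("1, 3-5", 8)

def Spec_parse_channel_spec (spec : String) (max_channels : Int) (out : List Int) : Prop := out = parse_channel_spec_alt spec max_channels
instance (spec : String) (max_channels : Int) (out : List Int) : Decidable (Spec_parse_channel_spec spec max_channels out) := by unfold Spec_parse_channel_spec; infer_instance

-- ===== CLAIM (what is proved, stated in full; the proofs are below) =====
def Claim_equal_parse_channel_spec : Prop := ∀ (spec : String) (max_channels : Int), Dom_parse_channel_spec spec max_channels → Pre_parse_channel_spec spec max_channels → Spec_parse_channel_spec spec max_channels (parse_channel_spec spec max_channels)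

-- ===== LEMMAS AND PROOFS =====

-- j is covered by some interval of ivs
def pvCovered (ivs : List (Int × Int)) (j : Int) : Prop := ∃ p ∈ ivs, p.1 ≤ j ∧ j < p.2

-- the invariant tying A's set to B's interval list
def pvInv (M : Int) (acc : PySem.Set Int) (ivs : List (Int × Int)) : Prop :=
  acc.Nodup ∧ (∀ x ∈ acc, 0 ≤ x ∧ x < M) ∧ (∀ p ∈ ivs, 0 ≤ p.1 ∧ p.1 < p.2 ∧ p.2 ≤ M) ∧
  (∀ j : Int, j ∈ acc ↔ pvCovered ivs j)

theorem pvCovered_append (ivs : List (Int × Int)) (p : Int × Int) (j : Int) :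
    pvCovered (ivs ++ [p]) j ↔ pvCovered ivs j ∨ (p.1 ≤ j ∧ j < p.2) := by
  simp [pvCovered, List.mem_append, or_and_right, exists_or]

theorem pvInv_update (M sv ev : Int) (hle : max 1 sv ≤ min M ev) (acc : PySem.Set Int)
    (ivs : List (Int × Int)) (hinv : pvInv M acc ivs) :
    pvInv M (acc.update (PySem.List.pyRange (max 1 sv - 1) (min M ev)))
      (ivs ++ [(max 1 sv - 1, min M ev)]) := by
  obtain ⟨hnd, hbd, hiv, hmem⟩ := hinv
  refine ⟨PySem.Set.nodup_update acc _ hnd, ?_, ?_, ?_⟩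
  · intro x hx
    rcases (PySem.Set.mem_update acc _ x).mp hx with h | h
    · exact hbd x h
    · rw [PySem.List.mem_pyRange_one] at h; omega
  · intro p hp
    rcases List.mem_append.mp hp with h | h
    · exact hiv p h
    · rcases List.mem_singleton.mp h with rfl
      refine ⟨by omega, by omega, by omega⟩
  · intro j
    rw [PySem.Set.mem_update, PySem.List.mem_pyRange_one, pvCovered_append, hmem j]

theorem pvInv_add (M idx : Int) (h1 : 1 ≤ idx) (h2 : idx ≤ M) (acc : PySem.Set Int)
    (ivs : List (Int × Int)) (hinv : pvInv M acc ivs) :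
    pvInv M (acc.add (idx - 1)) (ivs ++ [(idx - 1, idx)]) := by
  obtain ⟨hnd, hbd, hiv, hmem⟩ := hinv
  refine ⟨PySem.Set.nodup_add acc _ hnd, ?_, ?_, ?_⟩
  · intro x hx
    rcases (PySem.Set.mem_add acc _ x).mp hx with h | h
    · exact hbd x h
    · omega
  · intro p hp
    rcases List.mem_append.mp hp with h | h
    · exact hiv p h
    · rcases List.mem_singleton.mp h with rfl
      refine ⟨by omega, by omega, by omega⟩
  · intro j
    rw [PySem.Set.mem_add, pvCovered_append, hmem j]
    constructor
    · rintro (h | h)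
      · exact Or.inl h
      · exact Or.inr (by simp; omega)
    · rintro (h | h)
      · exact Or.inl h
      · simp at h; right; omega

theorem pvLoop_rel (M : Int) (pieces : List (List Char)) (acc : PySem.Set Int)
    (ivs : List (Int × Int)) (hinv : pvInv M acc ivs)
    (hok : ∀ c ∈ ((pieces.map PySem.Chars.strip).filter (fun c => !c.isEmpty)), pvOkChunk c = true) :
    ∃ acc' ivs', pvA_loop M ((pieces.map PySem.Chars.strip).filter (fun c => !c.isEmpty)) acc = some acc' ∧
      pvB_loop M pieces ivs = some ivs' ∧ pvInv M acc' ivs' := by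
  induction pieces generalizing acc ivs with
  | nil => exact ⟨acc, ivs, rfl, rfl, hinv⟩
  | cons piece rest ih =>
    by_cases hemp : (PySem.Chars.strip piece).isEmpty
    · have hfil : ((piece :: rest).map PySem.Chars.strip).filter (fun c => !c.isEmpty)
          = (rest.map PySem.Chars.strip).filter (fun c => !c.isEmpty) := by
        have heq : PySem.Chars.strip piece = [] := by simpa [List.isEmpty_iff] using hemp
        rw [List.map_cons, List.filter_cons, heq]
        simp
      rw [hfil] at hok ⊢
      have hB : pvB_loop M (piece :: rest) ivs = pvB_loop M rest ivs := by
        simp [pvB_loop, hemp]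
      rw [hB]
      exact ih acc ivs hinv hok
    · set chunk := PySem.Chars.strip piece with hchunk
      have hne : PySem.Chars.strip piece ≠ [] := by simpa [List.isEmpty_iff] using hemp
      have hfil : ((piece :: rest).map PySem.Chars.strip).filter (fun c => !c.isEmpty)
          = chunk :: (rest.map PySem.Chars.strip).filter (fun c => !c.isEmpty) := by
        simp [List.filter_cons, hne, hchunk]
      rw [hfil] at hok ⊢
      have hokc : pvOkChunk chunk = true := hok chunk (List.mem_cons_self ..)
      have hokr : ∀ c ∈ (rest.map PySem.Chars.strip).filter (fun c => !c.isEmpty), pvOkChunk c = true :=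
        fun c hc => hok c (List.mem_cons_of_mem _ hc)
      by_cases hdash : '-' ∈ chunk
      · simp only [pvOkChunk, List.contains_eq_mem, decide_eq_true_eq, if_pos hdash] at hokc
        match hsp : PySem.Chars.splitOnMax chunk ['-'] 1 with
        | [] => rw [hsp] at hokc; simp at hokc
        | [_] => rw [hsp] at hokc; simp at hokc
        | _ :: _ :: _ :: _ => rw [hsp] at hokc; simp at hokc
        | [s1, s2] =>
          rw [hsp] at hokc
          simp only [Bool.and_eq_true, Option.isSome_iff_exists] at hokc
          obtain ⟨⟨sv, hsv⟩, ⟨ev, hev⟩⟩ := hokc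
          have hstepA : pvA_loop M (chunk :: (rest.map PySem.Chars.strip).filter (fun c => !c.isEmpty)) acc
              = pvA_loop M ((rest.map PySem.Chars.strip).filter (fun c => !c.isEmpty))
                  (if max 1 sv ≤ min M ev then acc.update (PySem.List.pyRange (max 1 sv - 1) (min M ev)) else acc) := by
            simp [pvA_loop, hdash, hsp, hsv, hev]
          have hstepB : pvB_loop M (piece :: rest) ivs
              = pvB_loop M rest (if max 1 sv - 1 < min M ev then ivs ++ [(max 1 sv - 1, min M ev)] else ivs) := by
            simp [pvB_loop, hemp, ← hchunk, hdash, hsp, hsv, hev]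
          rw [hstepA, hstepB]
          by_cases hle : max 1 sv ≤ min M ev
          · rw [if_pos hle, if_pos (by omega)]
            exact ih _ _ (pvInv_update M sv ev hle acc ivs hinv) hokr
          · rw [if_neg hle, if_neg (by omega)]
            exact ih acc ivs hinv hokr
      · simp only [pvOkChunk, List.contains_eq_mem, decide_eq_true_eq, if_neg hdash] at hokc
        rw [Option.isSome_iff_exists] at hokc
        obtain ⟨idx, hidx⟩ := hokc
        have hstepA : pvA_loop M (chunk :: (rest.map PySem.Chars.strip).filter (fun c => !c.isEmpty)) acc
            = pvA_loop M ((rest.map PySem.Chars.strip).filter (fun c => !c.isEmpty))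
                (if 1 ≤ idx ∧ idx ≤ M then acc.add (idx - 1) else acc) := by
          simp [pvA_loop, hdash, hidx]
        have hstepB : pvB_loop M (piece :: rest) ivs
            = pvB_loop M rest (if 1 ≤ idx ∧ idx ≤ M then ivs ++ [(idx - 1, idx)] else ivs) := by
          simp [pvB_loop, hemp, ← hchunk, hdash, hidx]
        rw [hstepA, hstepB]
        by_cases hbnd : 1 ≤ idx ∧ idx ≤ M
        · rw [if_pos hbnd, if_pos hbnd]
          exact ih _ _ (pvInv_add M idx hbnd.1 hbnd.2 acc ivs hinv) hokr
        · rw [if_neg hbnd, if_neg hbnd]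
          exact ih acc ivs hinv hokr

-- Python's lexicographic tuple comparison, as sorted2 uses it on Int × Int
def pvLt (a b : Int × Int) : Bool :=
  decide (a.1 < b.1) || (!decide (b.1 < a.1) && decide (a.2 < b.2))

theorem pvInsertBy_cons (before : Int × Int → Int × Int → Bool) (x y : Int × Int)
    (ys : List (Int × Int)) :
    PySem.List.insertBy before x (y :: ys)
      = if before x y then x :: y :: ys else y :: PySem.List.insertBy before x ys := rfl

theorem pvPairwise_fst_insertBy (x : Int × Int) (l : List (Int × Int))
    (hl : l.Pairwise (fun a b => a.1 ≤ b.1)) :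
    (PySem.List.insertBy pvLt x l).Pairwise (fun a b => a.1 ≤ b.1) := by
  induction l with
  | nil => simp [PySem.List.insertBy]
  | cons y ys ih =>
    rw [pvInsertBy_cons]
    rcases List.pairwise_cons.mp hl with ⟨hy, hys⟩
    by_cases hb : pvLt x y = true
    · rw [if_pos hb]
      have hxy : x.1 ≤ y.1 := by
        simp only [pvLt, Bool.or_eq_true, Bool.and_eq_true, Bool.not_eq_true',
          decide_eq_true_eq, decide_eq_false_iff_not] at hb
        omega
      refine List.pairwise_cons.mpr ⟨?_, hl⟩
      intro z hz
      rcases List.mem_cons.mp hz with rfl | hz'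
      · exact hxy
      · exact le_trans hxy (hy z hz')
    · rw [if_neg hb]
      have hyx : y.1 ≤ x.1 := by
        simp only [pvLt, Bool.or_eq_true, Bool.and_eq_true, Bool.not_eq_true',
          decide_eq_true_eq, decide_eq_false_iff_not] at hb
        omega
      refine List.pairwise_cons.mpr ⟨?_, ih hys⟩
      intro z hz
      rcases (PySem.List.mem_insertBy pvLt x z ys).mp hz with rfl | hz'
      · exact hyx
      · exact hy z hz'

theorem pvPairwise_fst_foldl (l : List (Int × Int)) :
    ∀ (acc : List (Int × Int)), acc.Pairwise (fun a b => a.1 ≤ b.1) →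
      (l.foldl (fun acc x => PySem.List.insertBy pvLt x acc) acc).Pairwise (fun a b => a.1 ≤ b.1) := by
  induction l with
  | nil => intro acc h; exact h
  | cons x xs ih =>
    intro acc h
    exact ih _ (pvPairwise_fst_insertBy x acc h)

theorem pvSorted2_eq_foldl (ivs : List (Int × Int)) :
    PySem.List.sorted2 ivs (fun p => p.1) (fun p => p.2)
      = ivs.foldl (fun acc x => PySem.List.insertBy pvLt x acc) [] := rfl

theorem pvSorted2_pairwise_fst (ivs : List (Int × Int)) :
    (PySem.List.sorted2 ivs (fun p => p.1) (fun p => p.2)).Pairwise (fun a b => a.1 ≤ b.1) := by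
  rw [pvSorted2_eq_foldl]
  exact pvPairwise_fst_foldl ivs [] (List.Pairwise.nil)

theorem pvSweep_mem (rest : List (Int × Int)) :
    ∀ (cl ch : Int), (∀ p ∈ rest, cl ≤ p.1 ∧ p.1 < p.2) →
      rest.Pairwise (fun a b => a.1 ≤ b.1) → ∀ j : Int,
      (j ∈ pvSweep cl ch rest ↔ (cl ≤ j ∧ j < ch) ∨ pvCovered rest j) := by
  induction rest with
  | nil =>
    intro cl ch _ _ j
    simp [pvSweep, PySem.List.mem_pyRange_one, pvCovered]
  | cons p rest ih =>
    obtain ⟨lo, hi⟩ := p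
    intro cl ch hb hpw j
    obtain ⟨hcl_lo, hlohi⟩ := hb (lo, hi) (List.mem_cons_self ..)
    rcases List.pairwise_cons.mp hpw with ⟨hlo_rest, hpw'⟩
    have hcov : pvCovered ((lo, hi) :: rest) j ↔ (lo ≤ j ∧ j < hi) ∨ pvCovered rest j := by
      simp [pvCovered, or_and_right, exists_or]
    by_cases hle : lo ≤ ch
    · rw [show pvSweep cl ch ((lo, hi) :: rest) = pvSweep cl (max ch hi) rest from by
        simp [pvSweep, hle]]
      rw [ih cl (max ch hi) (fun q hq => ⟨(hb q (List.mem_cons_of_mem _ hq)).1,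
            (hb q (List.mem_cons_of_mem _ hq)).2⟩) hpw' j, hcov]
      constructor
      · rintro (h | h)
        · by_cases hjc : j < ch
          · exact Or.inl ⟨h.1, hjc⟩
          · exact Or.inr (Or.inl ⟨by omega, by omega⟩)
        · exact Or.inr (Or.inr h)
      · rintro (h | h | h)
        · exact Or.inl ⟨h.1, by omega⟩
        · exact Or.inl ⟨by omega, by omega⟩
        · exact Or.inr h
    · rw [show pvSweep cl ch ((lo, hi) :: rest) = PySem.List.pyRange cl ch ++ pvSweep lo hi rest from by
        simp [pvSweep, hle]]
      rw [List.mem_append, PySem.List.mem_pyRange_one,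
        ih lo hi (fun q hq => ⟨hlo_rest q hq, (hb q (List.mem_cons_of_mem _ hq)).2⟩) hpw' j, hcov]

theorem pvSweep_pairwise (rest : List (Int × Int)) :
    ∀ (cl ch : Int), (∀ p ∈ rest, cl ≤ p.1 ∧ p.1 < p.2) →
      rest.Pairwise (fun a b => a.1 ≤ b.1) → cl < ch →
      (pvSweep cl ch rest).Pairwise (· < ·) := by
  induction rest with
  | nil =>
    intro cl ch _ _ _
    simpa [pvSweep] using PySem.List.pairwise_lt_pyRange_one cl ch
  | cons p rest ih =>
    obtain ⟨lo, hi⟩ := p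
    intro cl ch hb hpw hch
    obtain ⟨hcl_lo, hlohi⟩ := hb (lo, hi) (List.mem_cons_self ..)
    rcases List.pairwise_cons.mp hpw with ⟨hlo_rest, hpw'⟩
    by_cases hle : lo ≤ ch
    · rw [show pvSweep cl ch ((lo, hi) :: rest) = pvSweep cl (max ch hi) rest from by
        simp [pvSweep, hle]]
      exact ih cl (max ch hi)
        (fun q hq => ⟨(hb q (List.mem_cons_of_mem _ hq)).1, (hb q (List.mem_cons_of_mem _ hq)).2⟩)
        hpw' (by omega)
    · rw [show pvSweep cl ch ((lo, hi) :: rest) = PySem.List.pyRange cl ch ++ pvSweep lo hi rest from by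
        simp [pvSweep, hle]]
      rw [List.pairwise_append]
      refine ⟨PySem.List.pairwise_lt_pyRange_one cl ch, ?_, ?_⟩
      · exact ih lo hi (fun q hq => ⟨hlo_rest q hq, (hb q (List.mem_cons_of_mem _ hq)).2⟩) hpw' hlohi
      · intro a ha b hbmem
        rw [PySem.List.mem_pyRange_one] at ha
        have hbmem' := (pvSweep_mem rest lo hi
          (fun q hq => ⟨hlo_rest q hq, (hb q (List.mem_cons_of_mem _ hq)).2⟩) hpw' b).mp hbmem
        have hblo : lo ≤ b := by
          rcases hbmem' with h | ⟨q, hq, h1, h2⟩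
          · omega
          · exact le_trans (hlo_rest q hq) h1
        omega

theorem pvFinish (M : Int) (acc : PySem.Set Int) (ivs : List (Int × Int))
    (hinv : pvInv M acc ivs) :
    (if acc.isEmpty then PySem.List.pyRange 0 (min 8 M) else PySem.List.sorted acc (fun x => x)) =
    (if ivs.isEmpty then PySem.List.pyRange 0 (min 8 M)
     else match PySem.List.sorted2 ivs (fun p => p.1) (fun p => p.2) with
          | [] => []
          | (l0, h0) :: rest => pvSweep l0 h0 rest) := by
  obtain ⟨hnd, hbd, hiv, hmem⟩ := hinv
  by_cases hnil : acc = []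
  · have hivnil : ivs = [] := by
      rcases hivs : ivs with _ | ⟨p, ps⟩
      · rfl
      · exfalso
        have : p.1 ∈ acc := (hmem p.1).mpr ⟨p, by rw [hivs]; exact List.mem_cons_self .., le_refl _,
          (hiv p (by rw [hivs]; exact List.mem_cons_self ..)).2.1⟩
        rw [hnil] at this
        exact absurd this (List.not_mem_nil)
    rw [if_pos (by simp [hnil]), if_pos (by simp [hivnil])]
  · have hivne : ivs ≠ [] := by
      obtain ⟨x, hx⟩ := List.exists_mem_of_ne_nil acc hnil
      obtain ⟨p, hp, _, _⟩ := (hmem x).mp hx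
      intro h; rw [h] at hp; exact absurd hp (List.not_mem_nil)
    rw [if_neg (by simpa using hnil), if_neg (by simpa using hivne)]
    have hperm : (PySem.List.sorted2 ivs (fun p => p.1) (fun p => p.2)).Perm ivs :=
      PySem.List.sorted2_perm ivs _ _ false
    have hpwS := pvSorted2_pairwise_fst ivs
    rcases hS : PySem.List.sorted2 ivs (fun p => p.1) (fun p => p.2) with _ | ⟨⟨l0, h0⟩, rest⟩
    · rw [hS] at hperm
      exact absurd hperm.symm.eq_nil hivne
    · rw [hS] at hperm hpwS
      rcases List.pairwise_cons.mp hpwS with ⟨hl0_rest, hpw'⟩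
      have hSb : ∀ p ∈ ((l0, h0) :: rest), 0 ≤ p.1 ∧ p.1 < p.2 ∧ p.2 ≤ M :=
        fun p hp => hiv p (hperm.mem_iff.mp hp)
      obtain ⟨_, hl0h0, _⟩ := hSb (l0, h0) (List.mem_cons_self ..)
      have hbrest : ∀ q ∈ rest, l0 ≤ q.1 ∧ q.1 < q.2 :=
        fun q hq => ⟨hl0_rest q hq, (hSb q (List.mem_cons_of_mem _ hq)).2.1⟩
      have hpwOut := pvSweep_pairwise rest l0 h0 hbrest hpw' hl0h0
      apply PySem.List.sorted_eq_of_perm_of_pairwise_lt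
      · rw [List.perm_ext_iff_of_nodup (hpwOut.imp fun h => ne_of_lt h) hnd]
        intro j
        rw [pvSweep_mem rest l0 h0 hbrest hpw' j, hmem j]
        have : pvCovered ivs j ↔ pvCovered ((l0, h0) :: rest) j := by
          unfold pvCovered
          constructor
          · rintro ⟨p, hp, h⟩; exact ⟨p, hperm.mem_iff.mpr hp, h⟩
          · rintro ⟨p, hp, h⟩; exact ⟨p, hperm.mem_iff.mp hp, h⟩
        rw [this]
        simp [pvCovered, or_and_right, exists_or]
      · exact hpwOut

-- ===== VERDICT (by name: the statement is the Claim_ definition above) =====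
theorem parse_channel_spec_spec : Claim_equal_parse_channel_spec := by
  intro spec M _ hpre
  unfold Spec_parse_channel_spec parse_channel_spec parse_channel_spec_alt
  set s := PySem.Chars.strip spec.toList with hs
  by_cases hearly : s.isEmpty ∨ PySem.Chars.lower s = "all".toList ∨ PySem.Chars.lower s = "*".toList
  · simp only [hearly, if_pos]
  · simp only [hearly, if_neg, not_false_iff]
    have hok : ∀ c ∈ pvChunks s, pvOkChunk c = true := by
      unfold Pre_parse_channel_spec at hpre
      rcases hpre with h | h | h | h
      · exact absurd (Or.inl h) hearly
      · exact absurd (Or.inr (Or.inl h)) hearly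
      · exact absurd (Or.inr (Or.inr h)) hearly
      · exact h
    have hinv0 : pvInv M PySem.Set.empty [] := by
      refine ⟨List.nodup_nil, by simp [PySem.Set.empty], by simp, ?_⟩
      intro j
      simp [PySem.Set.empty, pvCovered]
    obtain ⟨acc', ivs', hA, hB, hinv⟩ := pvLoop_rel M (PySem.Chars.splitOn s [','])
      PySem.Set.empty [] hinv0 hok
    rw [show pvChunks s = (((PySem.Chars.splitOn s [',']).map PySem.Chars.strip).filter (fun c => !c.isEmpty)) from rfl] at *
    rw [hA, hB]
    exact pvFinish M acc' ivs' hinv
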